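-- pv_equiv track=rewrite | github.com/HalfPunch/yandex-algoritm-training-6-homework | homework-1/C-tablet-writings.py | binary_trim
-- ===== SOURCE A (Python) =====
-- def binary_trim(untrimmed_arr: [[]], arr_len: int) -> [[[]], int, int]:
--     top_trim, bottom_trim, left_trim, right_trim = 0, 0, 0, 0
--     is_top_not_found, is_bottom_not_found, is_left_not_found, is_right_not_found = True, True, True, True
--     # Vertical trimming
--     for row in range(arr_len):
--         for column in range(arr_len):
--             # Top Trimming Condition
--             if untrimmed_arr[row][column] != 0:
--                 is_top_not_found = False
--             # Bottom Trimming Condition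
--             if untrimmed_arr[arr_len - row - 1][column] != 0:
--                 is_bottom_not_found = False
--         if not is_top_not_found and not is_bottom_not_found:
--             break
--         if is_bottom_not_found:
--             bottom_trim += 1
--         if is_top_not_found:
--             top_trim += 1
--     # Horizontal trimming
--     for column in range(arr_len):
--         for row in range(top_trim, arr_len - bottom_trim):
--             # Left Trimming Condition
--             if untrimmed_arr[row][column] != 0:
--                 is_left_not_found = False
--             # Right Trimming Condition
--             if untrimmed_arr[row][arr_len - column - 1] != 0:
--                 is_right_not_found = False
--         if not is_left_not_found and not is_right_not_found:
--             break
--         if is_left_not_found: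
--             left_trim += 1
--         if is_right_not_found:
--             right_trim += 1
--     trimmed_arr = []
--     for i in range(top_trim, arr_len - bottom_trim):
--         trimmed_arr.append(untrimmed_arr[i][left_trim:arr_len - right_trim])
--     return trimmed_arr, arr_len - top_trim - bottom_trim, arr_len - left_trim - right_trim
-- ===== SOURCE B (Python) =====
-- def binary_trim(untrimmed_arr, arr_len):
--     n = arr_len
--
--     def row_zero(r):
--         return all(untrimmed_arr[r][c] == 0 for c in range(n))
--
--     top_trim = 0
--     while top_trim < n and row_zero(top_trim):
--         top_trim += 1
--     bottom_trim = 0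
--     while bottom_trim < n and row_zero(n - 1 - bottom_trim):
--         bottom_trim += 1
--
--     mid = range(top_trim, n - bottom_trim)
--
--     def col_zero(c):
--         return all(untrimmed_arr[r][c] == 0 for r in mid)
--
--     left_trim = 0
--     while left_trim < n and col_zero(left_trim):
--         left_trim += 1
--     right_trim = 0
--     while right_trim < n and col_zero(n - 1 - right_trim):
--         right_trim += 1
--
--     trimmed_arr = [untrimmed_arr[i][left_trim:n - right_trim] for i in mid]
--     return trimmed_arr, n - top_trim - bottom_trim, n - left_trim - right_trim
-- ===== Notes on version B (the rewrite author's own statement) =====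
-- stated objective: simpler
-- what changed: Replaces A's two flag-tracking break-loops (sticky not-found flags threaded through paired top/bottom and left/right passes) by four independent edge scans: count leading all-zero rows from the top and from the bottom, then leading all-zero columns of the remaining middle band from the left and from the right, and slice.
-- outside the precondition, e.g. on binary_trim([[1]], 2): A raises IndexError, B raises IndexError
import Mathlib
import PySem

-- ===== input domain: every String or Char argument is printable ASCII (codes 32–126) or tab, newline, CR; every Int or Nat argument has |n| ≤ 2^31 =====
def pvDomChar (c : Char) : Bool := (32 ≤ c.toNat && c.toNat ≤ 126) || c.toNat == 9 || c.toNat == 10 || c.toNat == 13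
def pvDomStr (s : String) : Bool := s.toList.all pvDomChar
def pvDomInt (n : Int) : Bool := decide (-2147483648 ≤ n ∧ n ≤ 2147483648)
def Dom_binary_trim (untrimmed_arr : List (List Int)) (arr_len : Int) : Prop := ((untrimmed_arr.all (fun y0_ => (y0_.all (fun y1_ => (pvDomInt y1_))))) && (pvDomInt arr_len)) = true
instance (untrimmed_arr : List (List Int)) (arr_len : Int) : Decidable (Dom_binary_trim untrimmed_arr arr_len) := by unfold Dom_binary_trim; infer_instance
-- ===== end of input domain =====

-- B replaces A's two flag-tracking break-loops by four independent edge scans (leading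
-- all-zero rows from the top / bottom, then leading all-zero columns of the middle band
-- from the left / right); objective: simpler decomposition, same output everywhere.

-- untrimmed_arr[i][j]; exact where both indices are in range (guaranteed by Pre_binary_trim)
def pvGet (arr : List (List Int)) (i j : Int) : Int :=
  ((PySem.List.pyGet? arr i).bind (fun r => PySem.List.pyGet? r j)).getD 0

-- ===== PORT A =====
-- inner 'for column/row in range(...)' of a trimming pass: updates the two not-found flags
def pvVStep (arr : List (List Int)) (n : Int) (row : Int) (fl : Bool × Bool) : Bool × Bool :=
  (PySem.List.pyRange 0 n).foldl
    (fun fl col =>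
      (if pvGet arr row col ≠ 0 then false else fl.1,
       if pvGet arr (n - row - 1) col ≠ 0 then false else fl.2)) fl

def pvHStep (arr : List (List Int)) (n top bot : Int) (col : Int) (fl : Bool × Bool) : Bool × Bool :=
  (PySem.List.pyRange top (n - bot)).foldl
    (fun fl row =>
      (if pvGet arr row col ≠ 0 then false else fl.1,
       if pvGet arr row (n - col - 1) ≠ 0 then false else fl.2)) fl

-- A's outer loop shape, shared by both passes: counters, sticky flags, break when both found
def pvABLoop (step : Int → Bool × Bool → Bool × Bool) :
    List Int → Int → Int → Bool → Bool → Int × Int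
  | [], t, b, _, _ => (t, b)
  | r :: rest, t, b, f1, f2 =>
    let p := step r (f1, f2)
    if p.1 = false ∧ p.2 = false then (t, b)
    else pvABLoop step rest (if p.1 then t + 1 else t) (if p.2 then b + 1 else b) p.1 p.2

def binary_trim (untrimmed_arr : List (List Int)) (arr_len : Int) : List (List Int) × Int × Int :=
  let n := arr_len
  let tb := pvABLoop (pvVStep untrimmed_arr n) (PySem.List.pyRange 0 n) 0 0 true true
  let lr := pvABLoop (pvHStep untrimmed_arr n tb.1 tb.2) (PySem.List.pyRange 0 n) 0 0 true true
  let trimmed := (PySem.List.pyRange tb.1 (n - tb.2)).foldl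
    (fun acc i =>
      acc ++ [PySem.List.slice ((PySem.List.pyGet? untrimmed_arr i).getD []) (some lr.1) (some (n - lr.2))]) []
  (trimmed, n - tb.1 - tb.2, n - lr.1 - lr.2)

-- ===== PORT B =====
def pvRowZero (arr : List (List Int)) (n r : Int) : Bool :=
  (PySem.List.pyRange 0 n).all (fun c => pvGet arr r c == 0)

def pvColZero (arr : List (List Int)) (lo hi c : Int) : Bool :=
  (PySem.List.pyRange lo hi).all (fun r => pvGet arr r c == 0)

-- 'while t < n and p(t): t += 1' starting at t = 0: the guard t < n is the fuel n.toNat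
def pvScan (p : Int → Bool) : Nat → Int → Int
  | 0, t => t
  | f + 1, t => if p t then pvScan p f (t + 1) else t

def binary_trim_alt (untrimmed_arr : List (List Int)) (arr_len : Int) : List (List Int) × Int × Int :=
  let n := arr_len
  let top := pvScan (fun t => pvRowZero untrimmed_arr n t) n.toNat 0
  let bot := pvScan (fun t => pvRowZero untrimmed_arr n (n - 1 - t)) n.toNat 0
  let left := pvScan (fun c => pvColZero untrimmed_arr top (n - bot) c) n.toNat 0
  let right := pvScan (fun c => pvColZero untrimmed_arr top (n - bot) (n - 1 - c)) n.toNat 0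
  let trimmed := (PySem.List.pyRange top (n - bot)).map
    (fun i => PySem.List.slice ((PySem.List.pyGet? untrimmed_arr i).getD []) (some left) (some (n - right)))
  (trimmed, n - top - bot, n - left - right)

-- ===== PRECONDITION & SPEC =====
-- Pre_ excludes exactly the inputs on which A raises IndexError: arr_len exceeding the number
-- of rows, or a row among the first arr_len that is shorter than arr_len.
def Pre_binary_trim (untrimmed_arr : List (List Int)) (arr_len : Int) : Prop :=
  arr_len ≤ (untrimmed_arr.length : Int) ∧
  ∀ row ∈ untrimmed_arr.take arr_len.toNat, arr_len ≤ (row.length : Int)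

instance (untrimmed_arr : List (List Int)) (arr_len : Int) : Decidable (Pre_binary_trim untrimmed_arr arr_len) := by
  unfold Pre_binary_trim; infer_instance

def pvWitness_binary_trim : List (List Int) × Int := ([[0, 0], [0, 1]], 2)

def Spec_binary_trim (untrimmed_arr : List (List Int)) (arr_len : Int) (out : List (List Int) × Int × Int) : Prop := out = binary_trim_alt untrimmed_arr arr_len
instance (untrimmed_arr : List (List Int)) (arr_len : Int) (out : List (List Int) × Int × Int) : Decidable (Spec_binary_trim untrimmed_arr arr_len out) := by unfold Spec_binary_trim; infer_instance

-- ===== CLAIM (what is proved, stated in full; the proofs are below) =====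
def Claim_equal_binary_trim : Prop := ∀ (untrimmed_arr : List (List Int)) (arr_len : Int), Dom_binary_trim untrimmed_arr arr_len → Pre_binary_trim untrimmed_arr arr_len → Spec_binary_trim untrimmed_arr arr_len (binary_trim untrimmed_arr arr_len)

-- ===== LEMMAS AND PROOFS =====

lemma foldl_flags (f g : Int → Int) (L : List Int) :
    ∀ a b : Bool,
      L.foldl (fun fl col =>
          (if f col ≠ 0 then false else fl.1, if g col ≠ 0 then false else fl.2)) (a, b)
        = (a && L.all (fun c => f c == 0), b && L.all (fun c => g c == 0)) := by
  induction L with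
  | nil => intro a b; simp
  | cons x xs ih =>
    intro a b
    simp only [List.foldl_cons, List.all_cons, ih]
    by_cases hf : f x = 0 <;> by_cases hg : g x = 0 <;> simp [hf, hg]

lemma vstep_eq (arr : List (List Int)) (n : Int) (r : Int) (fl : Bool × Bool) :
    pvVStep arr n r fl = (fl.1 && pvRowZero arr n r, fl.2 && pvRowZero arr n (n - 1 - r)) := by
  cases fl with
  | mk a b =>
    unfold pvVStep pvRowZero
    rw [foldl_flags (fun c => pvGet arr r c) (fun c => pvGet arr (n - r - 1) c)]
    have h : n - r - 1 = n - 1 - r := by ring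
    rw [h]

lemma hstep_eq (arr : List (List Int)) (n top bot : Int) (c : Int) (fl : Bool × Bool) :
    pvHStep arr n top bot c fl
      = (fl.1 && pvColZero arr top (n - bot) c, fl.2 && pvColZero arr top (n - bot) (n - 1 - c)) := by
  cases fl with
  | mk a b =>
    unfold pvHStep pvColZero
    rw [foldl_flags (fun r => pvGet arr r c) (fun r => pvGet arr r (n - c - 1))]
    have h : n - c - 1 = n - 1 - c := by ring
    rw [h]

lemma pvScan_spec (p : Int → Bool) :
    ∀ (f : Nat) (k : Int), ∃ t : Nat,
      pvScan p f k = k + t ∧ t ≤ f ∧ (∀ i : Nat, i < t → p (k + i) = true) ∧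
        (t < f → p (k + t) = false) := by
  intro f
  induction f with
  | zero =>
    intro k
    exact ⟨0, by simp [pvScan], Nat.le_refl 0, fun i hi => absurd hi (Nat.not_lt_zero i),
      fun h => absurd h (Nat.lt_irrefl 0)⟩
  | succ f ih =>
    intro k
    by_cases hp : p k = true
    · obtain ⟨t, h1, h2, h3, h4⟩ := ih (k + 1)
      refine ⟨t + 1, ?_, by omega, ?_, ?_⟩
      · simp only [pvScan, hp, if_true, h1]; push_cast; ring
      · intro i hi
        cases i with
        | zero => simpa using hp
        | succ j =>
          have := h3 j (by omega)
          have e : k + (↑(j + 1) : Int) = (k + 1) + j := by push_cast; ring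
          rw [e]; exact this
      · intro h
        have := h4 (by omega)
        have e : k + (↑(t + 1) : Int) = (k + 1) + t := by push_cast; ring
        rw [e]; exact this
    · refine ⟨0, by simp [pvScan, hp], Nat.zero_le _, fun i hi => absurd hi (Nat.not_lt_zero i),
        fun _ => by simpa using (Bool.not_eq_true _).mp hp⟩

lemma pvABLoop_eq (step : Int → Bool × Bool → Bool × Bool) (P Q : Int → Bool)
    (hstep : ∀ r fl, step r fl = (fl.1 && P r, fl.2 && Q r))
    (N t b : Nat) (htN : t ≤ N) (hbN : b ≤ N)
    (htP : ∀ i : Nat, i < t → P i = true) (htP' : t < N → P t = false)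
    (hbQ : ∀ i : Nat, i < b → Q i = true) (hbQ' : b < N → Q b = false) :
    ∀ (j k : Nat), k + j = N →
      pvABLoop step (PySem.List.pyRange (k : Int) (N : Int))
        ((min t k : Nat) : Int) ((min b k : Nat) : Int) (decide (k ≤ t)) (decide (k ≤ b))
        = ((t : Int), (b : Int)) := by
  intro j
  induction j with
  | zero =>
    intro k hk
    have hk' : k = N := by omega
    subst hk'
    have hempty : PySem.List.pyRange (k : Int) (k : Int) = [] := by
      rw [PySem.List.pyRange_one]; simp
    rw [hempty]
    simp only [pvABLoop]
    have h1 : min t k = t := by omega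
    have h2 : min b k = b := by omega
    rw [h1, h2]
  | succ j ih =>
    intro k hk
    have hkN : k < N := by omega
    rw [PySem.List.pyRange_one_cons (by exact_mod_cast hkN)]
    simp only [pvABLoop, hstep]
    have hP : (decide (k ≤ t) && P (k : Int)) = decide (k + 1 ≤ t) := by
      by_cases h1 : k < t
      · simp [Nat.le_of_lt h1, htP k h1, Nat.succ_le_of_lt h1]
      · by_cases h2 : k ≤ t
        · have hkt : k = t := by omega
          subst hkt
          have hne : ¬ (k + 1 ≤ k) := by omega
          simp [htP' (by omega), hne]
        · have hne : ¬ (k + 1 ≤ t) := by omega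
          simp [h2, hne]
    have hQ : (decide (k ≤ b) && Q (k : Int)) = decide (k + 1 ≤ b) := by
      by_cases h1 : k < b
      · simp [Nat.le_of_lt h1, hbQ k h1, Nat.succ_le_of_lt h1]
      · by_cases h2 : k ≤ b
        · have hkb : k = b := by omega
          subst hkb
          have hne : ¬ (k + 1 ≤ k) := by omega
          simp [hbQ' (by omega), hne]
        · have hne : ¬ (k + 1 ≤ b) := by omega
          simp [h2, hne]
    rw [hP, hQ]
    by_cases hbrk : ¬ (k + 1 ≤ t) ∧ ¬ (k + 1 ≤ b)
    · rw [if_pos (by simp [hbrk.1, hbrk.2])]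
      have h1 : min t k = t := by omega
      have h2 : min b k = b := by omega
      rw [h1, h2]
    · rw [if_neg (by simp only [decide_eq_false_iff_not, not_and_or, not_not] at hbrk ⊢; tauto)]
      have hc : ((k : Int) + 1) = ((k + 1 : Nat) : Int) := by push_cast; ring
      have e1 : (if (decide (k + 1 ≤ t)) = true then ((min t k : Nat) : Int) + 1 else ((min t k : Nat) : Int))
          = ((min t (k + 1) : Nat) : Int) := by
        by_cases h : k + 1 ≤ t
        · simp only [h, decide_true, if_true]
          have : min t k = k := by omega
          rw [this]
          have : min t (k + 1) = k + 1 := by omega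
          rw [this]; push_cast; ring
        · simp only [h, decide_false]
          have : min t k = min t (k + 1) := by omega
          rw [this]
          simp
      have e2 : (if (decide (k + 1 ≤ b)) = true then ((min b k : Nat) : Int) + 1 else ((min b k : Nat) : Int))
          = ((min b (k + 1) : Nat) : Int) := by
        by_cases h : k + 1 ≤ b
        · simp only [h, decide_true, if_true]
          have : min b k = k := by omega
          rw [this]
          have : min b (k + 1) = k + 1 := by omega
          rw [this]; push_cast; ring
        · simp only [h, decide_false]
          have : min b k = min b (k + 1) := by omega
          rw [this]
          simp
      rw [e1, e2, hc]
      exact ih (k + 1) (by omega)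

lemma binary_trim_eq_alt (arr : List (List Int)) (n : Int) :
    binary_trim arr n = binary_trim_alt arr n := by
  by_cases hn : 0 < n
  · have hN : ((n.toNat : Int)) = n := Int.toNat_of_nonneg (le_of_lt hn)
    set N := n.toNat with hNdef
    -- vertical counts
    obtain ⟨t, ht1, ht2, ht3, ht4⟩ := pvScan_spec (fun r => pvRowZero arr n r) N 0
    obtain ⟨b, hb1, hb2, hb3, hb4⟩ := pvScan_spec (fun r => pvRowZero arr n (n - 1 - r)) N 0
    have ht3' : ∀ i : Nat, i < t → pvRowZero arr n i = true := fun i hi => by simpa using ht3 i hi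
    have ht4' : t < N → pvRowZero arr n t = false := fun h => by simpa using ht4 h
    have hb3' : ∀ i : Nat, i < b → pvRowZero arr n (n - 1 - i) = true := fun i hi => by simpa using hb3 i hi
    have hb4' : b < N → pvRowZero arr n (n - 1 - b) = false := fun h => by simpa using hb4 h
    have hv := pvABLoop_eq (pvVStep arr n) (fun r => pvRowZero arr n r)
      (fun r => pvRowZero arr n (n - 1 - r)) (fun r fl => vstep_eq arr n r fl)
      N t b ht2 hb2 ht3' ht4' hb3' hb4' N 0 (by omega)
    simp only [Nat.cast_zero, Nat.min_zero, decide_true, Nat.zero_le, hN] at hv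
    -- horizontal counts
    obtain ⟨l, hl1, hl2, hl3, hl4⟩ := pvScan_spec (fun c => pvColZero arr t (n - b) c) N 0
    obtain ⟨r, hr1, hr2, hr3, hr4⟩ := pvScan_spec (fun c => pvColZero arr t (n - b) (n - 1 - c)) N 0
    have hl3' : ∀ i : Nat, i < l → pvColZero arr t (n - b) i = true := fun i hi => by simpa using hl3 i hi
    have hl4' : l < N → pvColZero arr t (n - b) l = false := fun h => by simpa using hl4 h
    have hr3' : ∀ i : Nat, i < r → pvColZero arr t (n - b) (n - 1 - i) = true := fun i hi => by simpa using hr3 i hi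
    have hr4' : r < N → pvColZero arr t (n - b) (n - 1 - r) = false := fun h => by simpa using hr4 h
    have hh := pvABLoop_eq (pvHStep arr n t b) (fun c => pvColZero arr t (n - b) c)
      (fun c => pvColZero arr t (n - b) (n - 1 - c)) (fun c fl => hstep_eq arr n t b c fl)
      N l r hl2 hr2 hl3' hl4' hr3' hr4' N 0 (by omega)
    simp only [Nat.cast_zero, Nat.min_zero, decide_true, Nat.zero_le, hN] at hh
    -- assemble
    simp only [binary_trim, binary_trim_alt, hv, hl1, hr1, ht1, hb1, zero_add, ← hNdef]
    rw [hh]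
    rw [PySem.List.foldl_append_singleton_eq_map]
    simp
  · have h0 : n.toNat = 0 := by omega
    have hr : PySem.List.pyRange 0 n = [] := by
      rw [PySem.List.pyRange_one]
      simp only [List.map_eq_nil_iff, List.range_eq_nil]
      omega
    simp only [binary_trim, binary_trim_alt, h0, hr, pvScan, pvABLoop]
    simp only [sub_zero]
    rw [hr]
    simp

-- ===== VERDICT (by name: the statement is the Claim_ definition above) =====
theorem binary_trim_spec : Claim_equal_binary_trim := by
  intro arr n _ _
  unfold Spec_binary_trim
  exact binary_trim_eq_alt arr n
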